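-- pv_equiv track=rewrite | github.com/grifenpierre/M1-ST | ImageTextFusion/project.py | sentence_SimilarityWindow
-- ===== SOURCE A (Python) =====
-- def sentence_SimilarityWindow(tokenizedSentences): # Returns the number of windows matches in a list of lists of sentences
--     #Must take as an argument a list of lists of strings
--     # Create a simple list to hold each similarity
--     windowsMatch = [0 for i in range(0,len(tokenizedSentences)*len(tokenizedSentences))]
--     pos = 0
--     # Similarity with the window method in a crude and simple way
--     for i in range(0,len(tokenizedSentences)):
--         for k in range(0,len(tokenizedSentences)):
--             match = 0
--             for j in range(0, len(tokenizedSentences[i]) -1):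
--                 w1 = tokenizedSentences[i][j] +' '+ tokenizedSentences[i][j +1]
--                 for m in range(0, len(tokenizedSentences[k]) -1):
--                     w2 = tokenizedSentences[k][m] +' '+ tokenizedSentences[k][m +1]
--                     if w1 == w2:
--                         match += 1
--             windowsMatch[pos] = match
--             pos += 1
--     return windowsMatch
-- ===== SOURCE B (Python) =====
-- def sentence_SimilarityWindow(tokenizedSentences):
--     # Precompute one bigram counter per sentence, then each pair's match count
--     # is the dot product of the two counters (sum of products of shared bigram counts).
--     counters = []
--     for s in tokenizedSentences:
--         c = {}
--         for a, b in zip(s, s[1:]):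
--             w = a + ' ' + b
--             c[w] = c.get(w, 0) + 1
--         counters.append(c)
--     out = []
--     for c1 in counters:
--         for c2 in counters:
--             out.append(sum(v * c2.get(w, 0) for w, v in c1.items()))
--     return out
-- ===== Notes on version B (the rewrite author's own statement) =====
-- stated objective: faster
-- what changed: Instead of comparing every bigram of sentence i against every bigram of sentence k for each ordered pair (O(L^2) string comparisons per pair), B builds one bigram counter dict per sentence once and computes each pair's match count as the dot product of the two counters.
import Mathlib
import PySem

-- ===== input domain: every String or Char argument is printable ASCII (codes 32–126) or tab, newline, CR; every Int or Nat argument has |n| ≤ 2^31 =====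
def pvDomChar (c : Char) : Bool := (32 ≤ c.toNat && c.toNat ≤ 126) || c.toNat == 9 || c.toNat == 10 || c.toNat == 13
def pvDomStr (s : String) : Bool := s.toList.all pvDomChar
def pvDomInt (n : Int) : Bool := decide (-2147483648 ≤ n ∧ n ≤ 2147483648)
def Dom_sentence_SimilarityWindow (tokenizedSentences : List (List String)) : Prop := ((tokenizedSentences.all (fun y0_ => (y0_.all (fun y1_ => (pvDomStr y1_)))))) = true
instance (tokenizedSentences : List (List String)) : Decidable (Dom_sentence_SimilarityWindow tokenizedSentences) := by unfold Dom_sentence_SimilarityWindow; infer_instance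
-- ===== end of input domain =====

-- B replaces A's per-pair double scan over both sentences' bigrams by one bigram counter per
-- sentence built once and a counter dot product per pair; the returned list is identical.


-- ===== PORT A =====
-- shared helper: the Python expression  a + ' ' + b  (exact: list-level concatenation)
def pvBg (a b : String) : String := String.ofList (a.toList ++ ' ' :: b.toList)

-- A-side helper: A's two innermost loops (the `match` count for the pair at (i, k))
def pvMatchA (si sk : List String) : Int :=
  (PySem.List.pyRange 0 ((si.length : Int) - 1) 1).foldl (fun mtc j =>
    (PySem.List.pyRange 0 ((sk.length : Int) - 1) 1).foldl (fun mtc m =>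
      if pvBg (PySem.List.pyGetD si j "") (PySem.List.pyGetD si (j + 1) "")
           == pvBg (PySem.List.pyGetD sk m "") (PySem.List.pyGetD sk (m + 1) "") then
        mtc + 1
      else mtc) mtc) 0

-- windowsMatch = [0]*n*n and pos = 0 are the initial state; the two outer loops write
-- windowsMatch[pos] = match and pos += 1; the final windowsMatch is returned.
def sentence_SimilarityWindow (tokenizedSentences : List (List String)) : List Int :=
  ((PySem.List.pyRange 0 (tokenizedSentences.length : Int) 1).foldl (fun st i =>
    (PySem.List.pyRange 0 (tokenizedSentences.length : Int) 1).foldl (fun (st : List Int × Int) k =>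
      (st.1.set st.2.toNat
        (pvMatchA (PySem.List.pyGetD tokenizedSentences i [])
                  (PySem.List.pyGetD tokenizedSentences k [])),
       st.2 + 1)) st)
    ((PySem.List.pyRange 0 ((tokenizedSentences.length : Int) * (tokenizedSentences.length : Int)) 1).map (fun _ => (0 : Int)),
     (0 : Int))).1

-- ===== PORT B =====
-- B-side helper: the bigram-counting dict loop of Source B, for one sentence
def pvBigramCounts (s : List String) : PySem.Dict String Int :=
  (s.zip (s.drop 1)).foldl (fun c p => c.insert (pvBg p.1 p.2) (c.getD (pvBg p.1 p.2) 0 + 1))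
    PySem.Dict.empty

-- B-side helper: sum(v * c2.get(w, 0) for w, v in c1.items())
def pvDot (c1 c2 : PySem.Dict String Int) : Int :=
  c1.items.foldl (fun acc kv => acc + kv.2 * c2.getD kv.1 0) 0

def sentence_SimilarityWindow_alt (tokenizedSentences : List (List String)) : List Int :=
  (tokenizedSentences.map pvBigramCounts).flatMap (fun c1 =>
    (tokenizedSentences.map pvBigramCounts).map (fun c2 => pvDot c1 c2))

-- ===== PRECONDITION & SPEC =====
def Spec_sentence_SimilarityWindow (tokenizedSentences : List (List String)) (out : List Int) : Prop := out = sentence_SimilarityWindow_alt tokenizedSentences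
instance (tokenizedSentences : List (List String)) (out : List Int) : Decidable (Spec_sentence_SimilarityWindow tokenizedSentences out) := by unfold Spec_sentence_SimilarityWindow; infer_instance

-- ===== CLAIM (what is proved, stated in full; the proofs are below) =====
def Claim_equal_sentence_SimilarityWindow : Prop := ∀ (tokenizedSentences : List (List String)), Dom_sentence_SimilarityWindow tokenizedSentences → Spec_sentence_SimilarityWindow tokenizedSentences (sentence_SimilarityWindow tokenizedSentences)

-- ===== LEMMAS AND PROOFS =====

-- the bigrams of a sentence, as a list (what both programs enumerate)
def pvBgs (s : List String) : List String := (s.zip (s.drop 1)).map (fun p => pvBg p.1 p.2)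

lemma pv_take_set (l : List Int) (p : Nat) (v : Int) :
    (l.set p v).take p = l.take p := by
  apply List.ext_getElem
  · simp
  · intro k h1 h2
    simp only [List.getElem_take, List.getElem_set]
    rw [if_neg]
    simp at h1; omega

lemma pv_take_set_succ (l : List Int) (p : Nat) (v : Int) (h : p < l.length) :
    (l.set p v).take (p + 1) = l.take p ++ [v] := by
  rw [List.take_add_one, pv_take_set]
  simp [h]

-- the write-at-pos loop fills the buffer left to right
lemma pv_fold_set {γ : Type} (ps : List γ) (m : γ → Int) :
    ∀ (buf : List Int) (p : Nat), buf.length = p + ps.length →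
    ps.foldl (fun (st : List Int × Int) x => (st.1.set st.2.toNat (m x), st.2 + 1))
      (buf, (p : Int)) = (buf.take p ++ ps.map m, ((p : Int) + ps.length)) := by
  induction ps with
  | nil =>
    intro buf p h
    simp only [List.length_nil] at h
    simp only [List.foldl_nil, List.map_nil, List.append_nil]
    rw [List.take_of_length_le (by omega : buf.length ≤ p)]
    simp
  | cons x xs ih =>
    intro buf p h
    simp only [List.foldl_cons, Int.toNat_natCast, List.map_cons]
    have hp : p < buf.length := by simp at h; omega
    have hc : ((p : Int) + 1) = ((p + 1 : Nat) : Int) := by push_cast [Nat.cast_add]; ring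
    rw [hc, ih (buf.set p (m x)) (p + 1) (by simp at h ⊢; omega)]
    rw [pv_take_set_succ buf p (m x) hp]
    refine Prod.ext ?_ ?_
    · simp
    · simp; ring

lemma pv_fold_set_zero {γ : Type} (ps : List γ) (m : γ → Int) (buf : List Int)
    (h : buf.length = ps.length) :
    ps.foldl (fun (st : List Int × Int) x => (st.1.set st.2.toNat (m x), st.2 + 1))
      (buf, (0 : Int)) = (ps.map m, (ps.length : Int)) := by
  have h0 := pv_fold_set ps m buf 0 (by omega)
  simpa using h0

-- a nested foldl is a foldl over the list of index pairs
lemma pv_foldl_foldl {σ γ δ : Type} (xs : List γ) (ys : List δ)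
    (f : γ × δ → σ → σ) (init : σ) :
    xs.foldl (fun st i => ys.foldl (fun st k => f (i, k) st) st) init
      = (xs.flatMap (fun i => ys.map (fun k => (i, k)))).foldl (fun st p => f p st) init := by
  induction xs generalizing init with
  | nil => simp
  | cons x xs ih => simp [List.foldl_append, List.foldl_map, ih]

-- the index form of the bigram enumeration equals the zip form
lemma pv_bigram_map (s : List String) :
    (PySem.List.pyRange 0 ((s.length : Int) - 1) 1).map
      (fun j => pvBg (PySem.List.pyGetD s j "") (PySem.List.pyGetD s (j + 1) ""))
      = pvBgs s := by
  rw [PySem.List.pyRange_one]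
  apply List.ext_getElem
  · simp [pvBgs]
  · intro k h1 h2
    simp only [pvBgs, List.getElem_map, List.getElem_range, List.getElem_zip, List.getElem_drop]
    have hk : k + 1 < s.length := by
      simp [pvBgs, List.length_zip] at h2; omega
    have e1 : (0 : Int) + (k : Int) = ((k : Nat) : Int) := by ring
    rw [e1]
    have e2 : ((k : Nat) : Int) + 1 = ((k + 1 : Nat) : Int) := by push_cast; ring
    rw [e2, PySem.List.pyGetD_natCast, PySem.List.pyGetD_natCast,
        List.getD_eq_getElem _ _ (by omega), List.getD_eq_getElem _ _ hk]
    simp [Nat.add_comm]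

-- count identity: summing ys-counts over xs with multiplicity = dot product of the two counters
lemma pv_count_sum (xs ys : List String) :
    (xs.map (fun w => ((ys.count w : Int)))).sum
      = ((PySem.Set.ofList xs).map (fun k => (xs.count k : Int) * (ys.count k : Int))).sum := by
  have hnd : (PySem.Set.ofList xs : List String).Nodup := by
    rw [← PySem.List.dedup_eq_ofList]; exact PySem.List.nodup_dedup xs
  rw [Finset.sum_list_map_count, ← List.sum_toFinset _ hnd]
  have hfs : (PySem.Set.ofList xs : List String).toFinset = xs.toFinset := by
    apply Finset.ext; intro a
    simp [← PySem.List.dedup_eq_ofList, PySem.List.mem_dedup]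
  rw [hfs]
  apply Finset.sum_congr rfl
  intro m _
  simp

-- B's dict loop builds exactly the bigram counter
lemma pv_counts_eq (s : List String) :
    pvBigramCounts s = PySem.Dict.counter (pvBgs s) := by
  unfold pvBigramCounts pvBgs
  rw [← PySem.Dict.foldl_insert_getD_add_one_eq_counter, List.foldl_map]

-- A's index loops are folds over the bigram lists
lemma pv_matchA_eq_fold (s t : List String) :
    pvMatchA s t = (pvBgs s).foldl (fun mtc w1 =>
      (pvBgs t).foldl (fun mtc w2 => if w1 == w2 then mtc + 1 else mtc) mtc) 0 := by
  rw [← pv_bigram_map s, ← pv_bigram_map t]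
  unfold pvMatchA
  simp only [List.foldl_map]

-- per ordered pair: A's match count = B's counter dot product
lemma pv_match_eq_dot (s t : List String) :
    pvMatchA s t = pvDot (pvBigramCounts s) (pvBigramCounts t) := by
  rw [pv_matchA_eq_fold, pv_counts_eq, pv_counts_eq]
  unfold pvDot
  rw [PySem.Dict.items_counter, List.foldl_map]
  simp only [PySem.Dict.getD_counter]
  have hinner : ∀ (mtc : Int) (w1 : String),
      (pvBgs t).foldl (fun m w2 => if w1 == w2 then m + 1 else m) mtc
        = mtc + ((pvBgs t).count w1 : Int) := by
    intro mtc w1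
    rw [PySem.List.foldl_count_if]
    congr 1
    norm_cast
    unfold List.count
    apply List.countP_congr
    intro a _
    exact (Bool.beq_comm : (w1 == a) = (a == w1)) ▸ Iff.rfl
  simp only [hinner]
  rw [PySem.List.foldl_add, PySem.List.foldl_add]
  simp only [zero_add]
  exact pv_count_sum (pvBgs s) (pvBgs t)

-- pulling an indexed map over the whole list back to a plain map
lemma pv_map_get {β : Type} (ts : List (List String)) (F : List String → β) :
    (PySem.List.pyRange 0 (ts.length : Int) 1).map (fun j => F (PySem.List.pyGetD ts j []))
      = ts.map F := by
  conv_rhs => rw [← PySem.List.map_pyGetD_pyRange_zero' ts []]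
  rw [List.map_map]
  rfl

lemma pv_flatMap_get {β : Type} (ts : List (List String)) (G : List String → List β) :
    (PySem.List.pyRange 0 (ts.length : Int) 1).flatMap (fun i => G (PySem.List.pyGetD ts i []))
      = ts.flatMap G := by
  rw [List.flatMap_def, List.flatMap_def, pv_map_get ts G]

-- the pair grid over indices equals the pair grid over the mapped counters
lemma pv_pairs (ts : List (List String)) :
    (PySem.List.pyRange 0 (ts.length : Int) 1).flatMap (fun i =>
      (PySem.List.pyRange 0 (ts.length : Int) 1).map (fun k =>
        pvDot (pvBigramCounts (PySem.List.pyGetD ts i []))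
              (pvBigramCounts (PySem.List.pyGetD ts k []))))
      = (ts.map pvBigramCounts).flatMap (fun c1 =>
          (ts.map pvBigramCounts).map (fun c2 => pvDot c1 c2)) := by
  conv_rhs => rw [List.flatMap_map]
  simp only [List.map_map, Function.comp_def]
  conv_rhs => rw [← pv_flatMap_get ts
    (fun s => ts.map (fun t => pvDot (pvBigramCounts s) (pvBigramCounts t)))]
  congr 1
  funext i
  exact pv_map_get ts (fun t => pvDot (pvBigramCounts (PySem.List.pyGetD ts i [])) (pvBigramCounts t))

-- ===== VERDICT (by name: the statement is the Claim_ definition above) =====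
theorem sentence_SimilarityWindow_spec : Claim_equal_sentence_SimilarityWindow := by
  intro ts _
  unfold Spec_sentence_SimilarityWindow sentence_SimilarityWindow sentence_SimilarityWindow_alt
  rw [pv_foldl_foldl _ _ (fun (p : Int × Int) (st : List Int × Int) =>
        (st.1.set st.2.toNat
          (pvMatchA (PySem.List.pyGetD ts p.1 []) (PySem.List.pyGetD ts p.2 [])), st.2 + 1))]
  rw [pv_fold_set_zero _ _ _ (by
        simp only [List.length_map, PySem.List.length_pyRange_one, List.length_flatMap,
          List.map_const', List.sum_replicate, smul_eq_mul]
        rw [show ((ts.length : Int) * (ts.length : Int) - 0) = ((ts.length * ts.length : Nat) : Int) by push_cast; ring,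
            Int.toNat_natCast]
        simp)]
  simp only [List.map_flatMap, List.map_map, Function.comp_def]
  simp only [pv_match_eq_dot]
  have h := pv_pairs ts
  simp only [List.map_map, Function.comp_def] at h
  exact h
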